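-- pv_equiv track=rewrite | github.com/ecaterinacatargiu/FP | Assignment2/A2/complexnumbers.py | RealNumbers
-- ===== SOURCE A (Python) =====
-- def getIm(c):
--     #return cn[1]
--     return c["Im"]
--
-- def RealNumbers(cn):
--     """A function that reuturns the longest sequence of real numbers(Im=0)
--     Input: cn
--     Output: the longest sequence of real numbers"""
--     sequence=[]
--     maxSequence=[]
--     i=0
--     while i<len(cn):
--         if getIm(cn[i])==0:
--             sequence.append(cn[i])
--         else:
--             if len(sequence)>len(maxSequence):
--                 maxSequence=[]
--                 maxSequence=sequence
--             sequence=[]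
--             #sequence.append(cn[i])
--         i+=1
--     if len(sequence)>len(maxSequence):
--         maxSequence=[]
--         maxSequence=sequence
--     return maxSequence
-- ===== SOURCE B (Python) =====
-- def getIm(c):
--     return c["Im"]
--
-- def RealNumbers(cn):
--     """Partition cn into maximal runs of consecutive real numbers (Im=0) in one
--     scan, then pick the longest run (first one wins ties)."""
--     runs = []
--     i = 0
--     n = len(cn)
--     while i < n:
--         if getIm(cn[i]) == 0:
--             j = i + 1
--             while j < n and getIm(cn[j]) == 0:
--                 j += 1
--             runs.append(cn[i:j])
--             i = j
--         else:
--             i += 1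
--     return max(runs, key=len, default=[])
-- ===== Notes on version B (the rewrite author's own statement) =====
-- stated objective: alternative
-- what changed: B splits the input into maximal runs of consecutive real numbers in one phase and then selects the longest run with max(runs, key=len) (first maximal run wins, as in A), instead of A's single loop that interleaves run accumulation with running-maximum bookkeeping in two mutable list variables.
import Mathlib
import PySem

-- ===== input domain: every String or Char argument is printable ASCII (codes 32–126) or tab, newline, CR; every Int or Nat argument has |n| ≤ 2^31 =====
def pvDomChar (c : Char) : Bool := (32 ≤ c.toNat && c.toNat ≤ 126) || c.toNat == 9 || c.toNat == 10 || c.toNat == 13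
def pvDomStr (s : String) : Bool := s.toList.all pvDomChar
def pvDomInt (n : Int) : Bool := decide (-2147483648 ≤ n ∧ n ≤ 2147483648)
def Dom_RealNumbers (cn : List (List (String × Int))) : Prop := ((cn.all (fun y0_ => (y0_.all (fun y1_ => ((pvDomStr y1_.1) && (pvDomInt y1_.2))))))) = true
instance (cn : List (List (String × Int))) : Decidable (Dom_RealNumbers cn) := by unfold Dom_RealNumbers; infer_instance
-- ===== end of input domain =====

-- B partitions the list into maximal runs of consecutive real numbers and then picks the
-- longest run (first wins), instead of A's interleaved accumulator/maximum loop; same cost.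


-- ===== PORT A =====
-- getIm(c) = c["Im"]; Pre_ guarantees the key is present, so the .getD 0 default is never used.
def getIm (c : List (String × Int)) : Int := (List.lookup "Im" c).getD 0

def stepA (st : List (List (String × Int)) × List (List (String × Int)))
    (c : List (String × Int)) :
    List (List (String × Int)) × List (List (String × Int)) :=
  if getIm c = 0 then (st.1 ++ [c], st.2)
  else if st.1.length > st.2.length then ([], st.1) else ([], st.2)

def RealNumbers (cn : List (List (String × Int))) : List (List (String × Int)) :=
  let st := cn.foldl stepA ([], [])
  if st.1.length > st.2.length then st.1 else st.2

-- ===== PORT B =====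
def pvReal (c : List (String × Int)) : Bool := getIm c == 0

-- one pass: cut cn into the maximal runs of consecutive reals (Source B's outer/inner while loops)
def splitRuns : List (List (String × Int)) → List (List (List (String × Int)))
  | [] => []
  | c :: rest =>
    if pvReal c then
      (c :: rest.takeWhile pvReal) :: splitRuns (rest.dropWhile pvReal)
    else splitRuns rest
termination_by xs => xs.length
decreasing_by
  · exact Nat.lt_succ_of_le (List.length_dropWhile_le _ _)
  · exact Nat.lt_succ_of_le (Nat.le_refl _)

-- max(runs, key=len, default=[])
def RealNumbers_alt (cn : List (List (String × Int))) : List (List (String × Int)) :=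
  PySem.List.maxD (splitRuns cn) (fun r => r.length) []

-- ===== PRECONDITION & SPEC =====
-- Pre_ excludes exactly the inputs on which Python A raises KeyError: a dict without key "Im".
def Pre_RealNumbers (cn : List (List (String × Int))) : Prop :=
  (cn.all (fun c => c.any (fun p => p.1 == "Im"))) = true
instance (cn : List (List (String × Int))) : Decidable (Pre_RealNumbers cn) := by
  unfold Pre_RealNumbers; infer_instance

def pvWitness_RealNumbers : (List (List (String × Int))) := [[("Im", 0)], [("Im", 2)], [("Im", 0)]]

def Spec_RealNumbers (cn : List (List (String × Int))) (out : List (List (String × Int))) : Prop := out = RealNumbers_alt cn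
instance (cn : List (List (String × Int))) (out : List (List (String × Int))) : Decidable (Spec_RealNumbers cn out) := by unfold Spec_RealNumbers; infer_instance

-- ===== CLAIM (what is proved, stated in full; the proofs are below) =====
def Claim_equal_RealNumbers : Prop := ∀ (cn : List (List (String × Int))), Dom_RealNumbers cn → Pre_RealNumbers cn → Spec_RealNumbers cn (RealNumbers cn)

-- ===== LEMMAS AND PROOFS =====

-- the "keep the longer, first wins" combiner both programs amount to
def pickL (m r : List (List (String × Int))) : List (List (String × Int)) :=
  if m.length < r.length then r else m

-- the step of PySem.List.max? with key length
def pickO (acc : Option (List (List (String × Int)))) (r : List (List (String × Int))) :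
    Option (List (List (String × Int))) :=
  match acc with
  | none => some r
  | some m => if m.length < r.length then some r else some m

theorem pickO_some (m r : List (List (String × Int))) : pickO (some m) r = some (pickL m r) := by
  simp [pickO, pickL]; split_ifs <;> rfl

theorem foldl_pickO_some (rs : List (List (List (String × Int)))) (m : List (List (String × Int))) :
    (rs.foldl pickO (some m)).getD [] = rs.foldl pickL m := by
  induction rs generalizing m with
  | nil => rfl
  | cons r rs ih => simp only [List.foldl_cons, pickO_some]; exact ih _

theorem foldl_pickO_none (rs : List (List (List (String × Int)))) :
    (rs.foldl pickO none).getD [] = rs.foldl pickL [] := by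
  cases rs with
  | nil => rfl
  | cons r rs =>
    simp only [List.foldl_cons]
    show (rs.foldl pickO (some r)).getD [] = rs.foldl pickL (pickL [] r)
    rw [foldl_pickO_some]
    cases r with
    | nil => rfl
    | cons a t => simp [pickL]

theorem alt_eq_foldl_pickL (cn : List (List (String × Int))) :
    RealNumbers_alt cn = (splitRuns cn).foldl pickL [] := by
  rw [← foldl_pickO_none]
  simp only [RealNumbers_alt, PySem.List.maxD, PySem.List.max?]
  exact congrArg (fun f => (List.foldl f none (splitRuns cn)).getD ([] : List (List (String × Int))))
    (funext fun acc => funext fun x => by cases acc <;> rfl)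

-- absorbing one maximal run into the accumulator of the run-maximum fold
theorem splitRuns_absorb (xs : List (List (String × Int))) (m : List (List (String × Int))) :
    (splitRuns xs).foldl pickL m
      = (splitRuns (xs.dropWhile pvReal)).foldl pickL (pickL m (xs.takeWhile pvReal)) := by
  cases xs with
  | nil => simp [splitRuns, pickL]
  | cons x t =>
    by_cases h : pvReal x = true
    · simp [splitRuns, h]
    · simp only [List.takeWhile_cons, List.dropWhile_cons, h, Bool.false_eq_true, if_false]
      simp [splitRuns, h, pickL]

-- the central invariant: A's loop, started with an open run `seq` and best-so-far `m`,
-- computes the run-maximum fold over the remaining runs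
theorem open_run (xs : List (List (String × Int))) (seq m : List (List (String × Int))) :
    (let st := xs.foldl stepA (seq, m);
      if st.1.length > st.2.length then st.1 else st.2)
      = (splitRuns (xs.dropWhile pvReal)).foldl pickL (pickL m (seq ++ xs.takeWhile pvReal)) := by
  induction xs generalizing seq m with
  | nil => simp [splitRuns, pickL, gt_iff_lt]
  | cons x t ih =>
    by_cases h : pvReal x = true
    · have hIm : getIm x = 0 := by simpa [pvReal] using h
      simp only [List.foldl_cons, stepA, hIm, List.takeWhile_cons,
        List.dropWhile_cons, h, if_true]
      rw [ih]
      simp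
    · have hIm : ¬ getIm x = 0 := by simpa [pvReal] using h
      simp only [List.foldl_cons, stepA, if_neg hIm, List.takeWhile_cons,
        List.dropWhile_cons, h, Bool.false_eq_true, if_false, List.append_nil]
      have step2 : (if seq.length > m.length then (([] : List (List (String × Int))), seq)
          else ([], m)) = ([], pickL m seq) := by
        simp only [pickL, gt_iff_lt]; split_ifs <;> rfl
      have hsr : splitRuns (x :: t) = splitRuns t := by simp [splitRuns, h]
      rw [step2, ih, hsr, List.nil_append, ← splitRuns_absorb]

-- ===== VERDICT (by name: the statement is the Claim_ definition above) =====
theorem RealNumbers_spec : Claim_equal_RealNumbers := by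
  intro cn _ _
  show RealNumbers cn = RealNumbers_alt cn
  rw [alt_eq_foldl_pickL]
  have h := open_run cn [] []
  simp only [List.nil_append] at h
  rw [RealNumbers, h, ← splitRuns_absorb]
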